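-- pv_equiv track=rewrite | github.com/bizyb/cs544 | hw1/limerick.py | _is_valid_diff
-- ===== SOURCE A (Python) =====
-- def _is_valid_diff(a_num_syllables, b_num_syllables):
--   """
--   Return True if the inter-line syllable count difference conforms to the
--   assignment specification. Return False otherwise.
--   """
--   # The syllable count difference between the B lines must not be greater than 2
--   if abs(b_num_syllables[0] - b_num_syllables[1]) > 2: return False
--
--   # The syllable count difference between any of the A lines must not be greater
--   # than 2
--   for i in range(len(a_num_syllables)):
--     for j in range(len(a_num_syllables)):
--       if abs(a_num_syllables[i] - a_num_syllables[j]) > 2: return False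
--
--   # Each of the B lines should have fewer syllables than the A lines
--   for i in range(len(a_num_syllables)):
--     for j in range(len(b_num_syllables)):
--        if a_num_syllables[i] - b_num_syllables[j] <= 0: return False
--   return True
-- ===== SOURCE B (Python) =====
-- def _is_valid_diff(a_num_syllables, b_num_syllables):
--   """
--   Return True if the inter-line syllable count difference conforms to the
--   assignment specification. Return False otherwise.
--   """
--   if abs(b_num_syllables[0] - b_num_syllables[1]) > 2:
--     return False
--   if a_num_syllables:
--     if max(a_num_syllables) - min(a_num_syllables) > 2:
--       return False
--     if min(a_num_syllables) <= max(b_num_syllables):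
--       return False
--   return True
-- ===== Notes on version B (the rewrite author's own statement) =====
-- stated objective: faster
-- what changed: Replaced A's two O(n^2) nested pairwise scans by O(n) max/min reductions: the A-line spread check becomes max(a)-min(a) > 2 and the cross check becomes min(a) <= max(b), guarded by 'if a_num_syllables:' so the empty-a case still returns True; Pre_ excludes only b shorter than 2, where both A and B raise IndexError.
import Mathlib
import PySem

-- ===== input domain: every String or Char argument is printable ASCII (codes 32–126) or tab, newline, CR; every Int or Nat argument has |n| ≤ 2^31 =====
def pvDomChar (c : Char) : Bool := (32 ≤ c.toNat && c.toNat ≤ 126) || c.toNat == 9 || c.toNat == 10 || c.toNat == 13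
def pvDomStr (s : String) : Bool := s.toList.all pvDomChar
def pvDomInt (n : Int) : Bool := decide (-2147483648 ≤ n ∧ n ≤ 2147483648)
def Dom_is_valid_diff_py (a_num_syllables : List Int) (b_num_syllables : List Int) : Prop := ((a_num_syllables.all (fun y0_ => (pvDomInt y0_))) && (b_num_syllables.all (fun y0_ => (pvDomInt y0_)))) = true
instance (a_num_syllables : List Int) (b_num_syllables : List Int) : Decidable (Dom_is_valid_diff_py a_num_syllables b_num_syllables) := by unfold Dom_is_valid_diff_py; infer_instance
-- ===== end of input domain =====

-- B replaces A's O(n^2) pairwise scans by O(n) max/min reductions; return value equivalence only.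

-- ===== PORT A =====
-- nested 'for' loops with early 'return False' become short-circuiting List.any over the same elements in the same order
def is_valid_diff_py (a_num_syllables : List Int) (b_num_syllables : List Int) : Bool :=
  match PySem.List.pyGet? b_num_syllables 0, PySem.List.pyGet? b_num_syllables 1 with
  | some b0, some b1 =>
    if 2 < |b0 - b1| then false
    else if a_num_syllables.any (fun x => a_num_syllables.any (fun y => 2 < |x - y|)) then false
    else if a_num_syllables.any (fun x => b_num_syllables.any (fun y => x - y ≤ 0)) then false
    else true
  | _, _ => false  -- IndexError in Python; excluded by Pre_

-- ===== PORT B =====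
def is_valid_diff_py_alt (a_num_syllables : List Int) (b_num_syllables : List Int) : Bool :=
  (((PySem.List.pyGet? b_num_syllables 0).bind fun b0 =>
    (PySem.List.pyGet? b_num_syllables 1).map fun b1 =>
    if 2 < |b0 - b1| then false
    else
      match PySem.List.max? a_num_syllables (fun x => x) with
      | none => true  -- a_num_syllables is empty: the 'if a_num_syllables:' guard in Source B skips both checks
      | some amax =>
        match PySem.List.min? a_num_syllables (fun x => x) with
        | none => true
        | some amin =>
          match PySem.List.max? b_num_syllables (fun x => x) with
          | none => true
          | some bmax =>
            if 2 < amax - amin then false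
            else if amin ≤ bmax then false
            else true
    ).getD false)  -- none = IndexError in Python; excluded by Pre_

-- ===== PRECONDITION & SPEC =====
-- Pre_ excludes exactly the inputs where A (and B alike) raises IndexError: b_num_syllables shorter than 2.
def Pre_is_valid_diff_py (a_num_syllables : List Int) (b_num_syllables : List Int) : Prop :=
  2 ≤ b_num_syllables.length
instance (a_num_syllables : List Int) (b_num_syllables : List Int) : Decidable (Pre_is_valid_diff_py a_num_syllables b_num_syllables) := by unfold Pre_is_valid_diff_py; infer_instance
def pvWitness_is_valid_diff_py : List Int × List Int := ([5, 6, 7], [3, 4])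

def Spec_is_valid_diff_py (a_num_syllables : List Int) (b_num_syllables : List Int) (out : Bool) : Prop := out = is_valid_diff_py_alt a_num_syllables b_num_syllables
instance (a_num_syllables : List Int) (b_num_syllables : List Int) (out : Bool) : Decidable (Spec_is_valid_diff_py a_num_syllables b_num_syllables out) := by unfold Spec_is_valid_diff_py; infer_instance

-- ===== CLAIM (what is proved, stated in full; the proofs are below) =====
def Claim_equal_is_valid_diff_py : Prop := ∀ (a_num_syllables : List Int) (b_num_syllables : List Int), Dom_is_valid_diff_py a_num_syllables b_num_syllables → Pre_is_valid_diff_py a_num_syllables b_num_syllables → Spec_is_valid_diff_py a_num_syllables b_num_syllables (is_valid_diff_py a_num_syllables b_num_syllables)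

-- ===== LEMMAS AND PROOFS =====

-- A's pairwise A-line scan fires iff the spread max - min exceeds 2
theorem anyA_eq_spread (a : List Int) (amax amin : Int)
    (hmax : PySem.List.max? a (fun x => x) = some amax)
    (hmin : PySem.List.min? a (fun x => x) = some amin) :
    (a.any (fun x => a.any (fun y => 2 < |x - y|))) = decide (2 < amax - amin) := by
  have hmaxmem := PySem.List.max?_mem hmax
  have hminmem := PySem.List.min?_mem hmin
  have hmaxle := PySem.List.max?_isMax hmax
  have hminle := PySem.List.min?_isMin hmin
  by_cases h : 2 < amax - amin
  · simp only [h, decide_true, List.any_eq_true]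
    refine ⟨amax, hmaxmem, amin, hminmem, ?_⟩
    have h0 : (0:Int) ≤ amax - amin := by linarith [hminle amax hmaxmem]
    simp [abs_of_nonneg h0, h]
  · simp only [h, decide_false]
    rw [List.any_eq_false]
    intro x hx
    rw [Bool.not_eq_true, List.any_eq_false]
    intro y hy
    simp only [Bool.not_eq_true, decide_eq_false_iff_not, not_lt, abs_le]
    constructor <;> linarith [hmaxle x hx, hminle x hx, hmaxle y hy, hminle y hy]

-- A's cross scan fires iff min(a) ≤ max(b)
theorem anyAB_eq_minmax (a b : List Int) (amin bmax : Int)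
    (hmin : PySem.List.min? a (fun x => x) = some amin)
    (hmax : PySem.List.max? b (fun x => x) = some bmax) :
    (a.any (fun x => b.any (fun y => x - y ≤ 0))) = decide (amin ≤ bmax) := by
  have hminmem := PySem.List.min?_mem hmin
  have hmaxmem := PySem.List.max?_mem hmax
  have hminle := PySem.List.min?_isMin hmin
  have hmaxle := PySem.List.max?_isMax hmax
  by_cases h : amin ≤ bmax
  · simp only [h, decide_true, List.any_eq_true]
    exact ⟨amin, hminmem, bmax, hmaxmem, by simpa using h⟩
  · simp only [h, decide_false]
    rw [List.any_eq_false]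
    intro x hx
    rw [Bool.not_eq_true, List.any_eq_false]
    intro y hy
    simp only [Bool.not_eq_true, decide_eq_false_iff_not, not_le]
    linarith [hminle x hx, hmaxle y hy, lt_of_not_ge h]

-- ===== VERDICT (by name: the statement is the Claim_ definition above) =====
theorem is_valid_diff_py_spec : Claim_equal_is_valid_diff_py := by
  intro a b _ hpre
  unfold Pre_is_valid_diff_py at hpre
  unfold Spec_is_valid_diff_py is_valid_diff_py is_valid_diff_py_alt
  match hb0 : PySem.List.pyGet? b 0, hb1 : PySem.List.pyGet? b 1 with
  | none, _ =>
    exact absurd (by simp [PySem.Raise.InRange]; omega : PySem.Raise.InRange b.length 0)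
      ((PySem.List.pyGet?_eq_none_iff b 0).mp hb0)
  | some b0, none =>
    exact absurd (by simp [PySem.Raise.InRange]; omega : PySem.Raise.InRange b.length 1)
      ((PySem.List.pyGet?_eq_none_iff b 1).mp hb1)
  | some b0, some b1 =>
    simp only [hb0, hb1, Option.bind_some, Option.map_some, Option.getD_some]
    by_cases hB : 2 < |b0 - b1|
    · simp [hB]
    · simp only [hB, if_false]
      have hbne : b ≠ [] := by intro h; subst h; simp at hpre
      obtain ⟨bmax, hbmax⟩ : ∃ m, PySem.List.max? b (fun x => x) = some m := by
        rcases h : PySem.List.max? b (fun x => x) with _ | m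
        · exact absurd ((PySem.List.max?_eq_none_iff _ _).mp h) hbne
        · exact ⟨m, rfl⟩
      rcases ha : a with _ | ⟨x, t⟩
      · have h0 : PySem.List.max? ([] : List Int) (fun x => x) = none :=
          (PySem.List.max?_eq_none_iff _ _).mpr rfl
        simp [h0]
      · obtain ⟨amax, hamax⟩ : ∃ m, PySem.List.max? (x :: t) (fun x => x) = some m := by
          rcases h : PySem.List.max? (x :: t) (fun x => x) with _ | m
          · exact absurd ((PySem.List.max?_eq_none_iff _ _).mp h) (by simp)
          · exact ⟨m, rfl⟩
        obtain ⟨amin, hamin⟩ : ∃ m, PySem.List.min? (x :: t) (fun x => x) = some m := by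
          rcases h : PySem.List.min? (x :: t) (fun x => x) with _ | m
          · exact absurd ((PySem.List.min?_eq_none_iff _ _).mp h) (by simp)
          · exact ⟨m, rfl⟩
        rw [anyA_eq_spread _ _ _ hamax hamin, anyAB_eq_minmax _ _ _ _ hamin hbmax]
        simp only [hamax, hamin, hbmax]
        by_cases h1 : 2 < amax - amin <;> by_cases h2 : amin ≤ bmax <;> simp [h1, h2]
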